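-- pv_equiv track=rewrite | github.com/511980-422005/coding-challenge | second.py | function
-- ===== SOURCE A (Python) =====
-- def function(str,dict):
--     while str:
--         find=False
--         for word in dict:
--             if str[:len(word)]==word:
--                 str=str[len(word):]
--                 find=True
--                 break
--         if not find:
--             return 0
--     return 1
-- ===== SOURCE B (Python) =====
-- def function(str, dict):
--     # Index the dictionary once: word -> index of its first occurrence, plus the
--     # set of distinct word lengths.  Then walk the string by position: at each
--     # position try every candidate length L, look str[i:i+L] up in the index,
--     # and take the match with the smallest dictionary index (the word A's
--     # first-match scan would pick); advance by its length.  Per step this costs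
--     # O(#distinct lengths * wordlen) lookups instead of a scan of the whole
--     # dictionary with a fresh slice per word.
--     idx = {}
--     for k, w in enumerate(dict):
--         if w not in idx:
--             idx[w] = k
--     lens = sorted({len(w) for w in dict})
--     i = 0
--     n = len(str)
--     while i < n:
--         best = None
--         bl = 0
--         for L in lens:
--             if i + L <= n:
--                 k = idx.get(str[i:i + L])
--                 if k is not None and (best is None or k < best):
--                     best = k
--                     bl = L
--         if best is None:
--             return 0
--         i += bl
--     return 1
-- ===== Notes on version B (the rewrite author's own statement) =====
-- stated objective: faster
-- what changed: B replaces A's per-step scan of the whole dictionary (slice-compare per word) by a hash index word->first-dict-index built once plus the set of distinct word lengths: at each position it looks up str[i:i+L] for each candidate length L and advances by the match with the smallest dictionary index, which is exactly the word A's first-match scan picks.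
import Mathlib
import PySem

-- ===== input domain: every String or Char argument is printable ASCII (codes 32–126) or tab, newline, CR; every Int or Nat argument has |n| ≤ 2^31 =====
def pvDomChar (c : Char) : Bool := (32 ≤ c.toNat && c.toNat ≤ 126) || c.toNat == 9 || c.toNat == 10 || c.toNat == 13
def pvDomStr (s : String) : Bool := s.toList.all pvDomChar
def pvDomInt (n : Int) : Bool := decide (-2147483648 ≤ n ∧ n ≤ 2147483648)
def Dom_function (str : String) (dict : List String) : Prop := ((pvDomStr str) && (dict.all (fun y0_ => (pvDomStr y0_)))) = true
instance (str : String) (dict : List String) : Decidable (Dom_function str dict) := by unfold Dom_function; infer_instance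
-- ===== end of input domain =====

-- B indexes the dictionary once (word -> first dictionary index, plus the distinct word
-- lengths) and at each position looks the candidate prefixes up by length, advancing by the
-- minimum-index match, instead of A's per-step scan of the whole dictionary (faster).

-- ===== PORT A =====
-- inner 'for word in dict: if str[:len(word)]==word: …': first word whose prefix-slice equals it
def findA (s : List Char) : List String → Option String
  | [] => none
  | w :: rest =>
      if PySem.List.slice s none (some (w.toList.length : Int)) = w.toList then some w
      else findA s rest

-- 'while str:' — fuel-bounded with fuel s.length + 1; every matched word that advances the
-- loop is nonempty whenever the Python terminates, so the fuel is never exhausted then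
def loopA (dict : List String) : Nat → List Char → Int
  | _, [] => 1
  | 0, _ => 0
  | f + 1, s =>
      match findA s dict with
      | some w => loopA dict f (PySem.List.slice s (some (w.toList.length : Int)) none)
      | none => 0

def function (str : String) (dict : List String) : Int :=
  loopA dict (str.toList.length + 1) str.toList

-- ===== PORT B =====
-- 'for k, w in enumerate(dict): if w not in idx: idx[w] = k'
def buildIdx : List String → Int → PySem.Dict String Int → PySem.Dict String Int
  | [], _, d => d
  | w :: rest, k, d =>
      if d.contains w then buildIdx rest (k + 1) d
      else buildIdx rest (k + 1) (d.insert w k)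

-- 'lens = sorted({len(w) for w in dict})'
def lensOf (dict : List String) : List Nat :=
  PySem.List.sorted (PySem.Set.ofList (dict.map (fun w => w.toList.length))) (fun x => x) false

-- 'for L in lens: if i+L<=n: k = idx.get(str[i:i+L]); if k is not None and (best is None or k < best): best, bl = k, L'
def scan (s : List Char) (idx : PySem.Dict String Int) (i : Nat) :
    List Nat → Option Int × Nat → Option Int × Nat
  | [], acc => acc
  | L :: rest, (best, bl) =>
      if i + L ≤ s.length then
        match idx.get? (String.ofList (PySem.List.slice s (some (i : Int)) (some ((i : Int) + (L : Int))))) with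
        | some k =>
            match best with
            | none => scan s idx i rest (some k, L)
            | some b => if k < b then scan s idx i rest (some k, L) else scan s idx i rest (best, bl)
        | none => scan s idx i rest (best, bl)
      else scan s idx i rest (best, bl)

-- 'while i < n:' — fuel-bounded like loopA, same fuel
def loopB (s : List Char) (idx : PySem.Dict String Int) (lens : List Nat) : Nat → Nat → Int
  | 0, i => if i < s.length then 0 else 1
  | f + 1, i =>
      if i < s.length then
        match scan s idx i lens (none, 0) with
        | (some _, bl) => loopB s idx lens f (i + bl)
        | (none, _) => 0
      else 1

def function_alt (str : String) (dict : List String) : Int :=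
  loopB str.toList (buildIdx dict 0 PySem.Dict.empty) (lensOf dict) (str.toList.length + 1) 0

-- ===== PRECONDITION & SPEC =====
def Spec_function (str : String) (dict : List String) (out : Int) : Prop := out = function_alt str dict
instance (str : String) (dict : List String) (out : Int) : Decidable (Spec_function str dict out) := by unfold Spec_function; infer_instance

-- ===== CLAIM (what is proved, stated in full; the proofs are below) =====
def Claim_equal_function : Prop := ∀ (str : String) (dict : List String), Dom_function str dict → Spec_function str dict (function str dict)

-- ===== LEMMAS AND PROOFS =====

-- A's match test (prefix-slice equality) says 'w.toList is a prefix of s'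
theorem findA_cond (s : List Char) (w : String) :
    (PySem.List.slice s none (some (w.toList.length : Int)) = w.toList) ↔ w.toList <+: s := by
  rw [PySem.List.slice_to_natCast]
  constructor
  · intro h; exact List.prefix_iff_eq_take.mpr h.symm
  · intro h; exact (List.prefix_iff_eq_take.mp h).symm

-- findA returns the FIRST matching word: its position, and no earlier entry matches
theorem findA_first (t : List Char) :
    ∀ (l : List String) (w : String), findA t l = some w →
      ∃ j : Nat, l[j]? = some w ∧ w.toList <+: t ∧
        ∀ j' < j, ∀ u, l[j']? = some u → ¬ u.toList <+: t := by
  intro l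
  induction l with
  | nil => intro w h; simp [findA] at h
  | cons v rest ih =>
      intro w h
      simp only [findA] at h
      split at h
      · rename_i hcond
        cases h
        exact ⟨0, by simp, (findA_cond _ _).mp hcond, by omega⟩
      · rename_i hcond
        obtain ⟨j, h1, h2, h3⟩ := ih w h
        refine ⟨j + 1, by simpa using h1, h2, ?_⟩
        intro j' hj' u hu
        cases j' with
        | zero =>
            simp at hu
            subst hu
            exact fun hp => hcond ((findA_cond _ _).mpr hp)
        | succ j'' =>
            simp only [List.getElem?_cons_succ] at hu
            exact h3 j'' (by omega) u hu

theorem findA_none (t : List Char) :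
    ∀ (l : List String), findA t l = none → ∀ u ∈ l, ¬ u.toList <+: t := by
  intro l
  induction l with
  | nil => intro _ u hu; simp at hu
  | cons v rest ih =>
      intro h u hu
      simp only [findA] at h
      split at h
      · exact absurd h (by simp)
      · rename_i hcond
        rcases List.mem_cons.mp hu with rfl | hmem
        · exact fun hp => hcond ((findA_cond _ _).mpr hp)
        · exact ih h u hmem

-- the index built by B is exactly 'first occurrence index, offset by the running counter'
theorem buildIdx_get :
    ∀ (l : List String) (k0 : Int) (d : PySem.Dict String Int) (u : String),
      (buildIdx l k0 d).get? u =
        match d.get? u with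
        | some v => some v
        | none => (List.idxOf? u l).map (fun j => k0 + (j : Int)) := by
  intro l
  induction l with
  | nil => intro k0 d u; cases hd : d.get? u <;> simp [buildIdx, hd]
  | cons w rest ih =>
      intro k0 d u
      simp only [buildIdx]
      split
      · rename_i hc
        rw [ih]
        cases hd : d.get? u
        · have huw : ¬ (w == u) = true := by
            intro h
            rw [eq_of_beq h] at hc
            rw [PySem.Dict.contains_eq_isSome_get?, hd] at hc
            simp at hc
          rw [List.idxOf?_cons, if_neg huw]
          cases List.idxOf? u rest <;> simp
          ring
        · rfl
      · rename_i hc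
        rw [ih]
        by_cases hu : u = w
        · subst hu
          have hd : d.get? u = none := by
            rw [PySem.Dict.contains_eq_isSome_get?] at hc
            cases hdu : d.get? u
            · rfl
            · rw [hdu] at hc; simp at hc
          rw [PySem.Dict.get?_insert, if_pos rfl, hd, List.idxOf?_cons, if_pos (by simp)]
          simp
        · rw [PySem.Dict.get?_insert, if_neg hu]
          cases hd : d.get? u
          · have huw : ¬ (w == u) = true := by
              intro h; exact hu (eq_of_beq h).symm
            rw [List.idxOf?_cons, if_neg huw]
            cases List.idxOf? u rest <;> simp
            ring
          · rfl

-- specialized: the index started from the empty dict is the first-occurrence index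
theorem idx_get (dict : List String) (u : String) :
    (buildIdx dict 0 PySem.Dict.empty).get? u = (List.idxOf? u dict).map (fun j => (j : Int)) := by
  rw [buildIdx_get, PySem.Dict.get?_empty]
  cases List.idxOf? u dict <;> simp

-- candidate soundness: a hit in the index at length L is a dictionary word equal to t.take L
theorem cand_sound (s : List Char) (dict : List String) (i L : Nat) (k : Int)
    (hiL : i + L ≤ s.length)
    (hget : (buildIdx dict 0 PySem.Dict.empty).get? (String.ofList ((s.drop i).take L)) = some k) :
    ∃ (u : String) (kn : Nat), k = (kn : Int) ∧
      dict[kn]? = some u ∧ (∀ j < kn, dict[j]? ≠ some u) ∧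
      u.toList <+: s.drop i ∧ u.toList.length = L := by
  rw [idx_get] at hget
  cases hio : List.idxOf? (String.ofList ((s.drop i).take L)) dict with
  | none => rw [hio] at hget; simp at hget
  | some kn =>
      rw [hio] at hget
      have hk : k = (kn : Int) := by simpa using hget.symm
      obtain ⟨hlt, heq, hmin⟩ := List.idxOf?_eq_some_iff.mp hio
      refine ⟨String.ofList ((s.drop i).take L), kn, hk, ?_, ?_, ?_, ?_⟩
      · exact List.getElem?_eq_some_iff.mpr ⟨hlt, heq⟩
      · intro j hj hju
        exact hmin j (by omega) (List.getElem?_eq_some_iff.mp hju).2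
      · rw [String.toList_ofList]; exact List.take_prefix _ _
      · rw [String.toList_ofList, List.length_take, List.length_drop]; omega

-- once the scan holds the minimal index, later candidates (all ≥ it) never replace it
theorem scan_absorb (s : List Char) (idx : PySem.Dict String Int) (i : Nat) (j : Int) (L0 : Nat) :
    ∀ ls : List Nat,
      (∀ L ∈ ls, ∀ k, i + L ≤ s.length →
        idx.get? (String.ofList ((s.drop i).take L)) = some k → j ≤ k) →
      scan s idx i ls (some j, L0) = (some j, L0) := by
  intro ls
  induction ls with
  | nil => intro _; rfl
  | cons L rest ih =>
      intro hs
      simp only [scan]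
      rw [PySem.List.slice_natCast_add]
      split
      · rename_i hiL
        cases hg : idx.get? (String.ofList ((s.drop i).take L)) with
        | none => exact ih (fun L' hL' => hs L' (by simp [hL']))
        | some k =>
            have hjk : j ≤ k := hs L (by simp) k hiL hg
            dsimp only
            rw [if_neg (by omega)]
            exact ih (fun L' hL' => hs L' (by simp [hL']))
      · exact ih (fun L' hL' => hs L' (by simp [hL']))

-- a scan with no index hit at any length leaves the accumulator untouched
theorem scan_none (s : List Char) (idx : PySem.Dict String Int) (i : Nat) :
    ∀ (ls : List Nat) (acc : Option Int × Nat),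
      (∀ L ∈ ls, i + L ≤ s.length → idx.get? (String.ofList ((s.drop i).take L)) = none) →
      scan s idx i ls acc = acc := by
  intro ls
  induction ls with
  | nil => intro _ _; rfl
  | cons L rest ih =>
      intro acc hs
      obtain ⟨best, bl⟩ := acc
      simp only [scan]
      rw [PySem.List.slice_natCast_add]
      split
      · rename_i hiL
        rw [hs L (by simp) hiL]
        exact ih _ (fun L' hL' => hs L' (by simp [hL']))
      · exact ih _ (fun L' hL' => hs L' (by simp [hL']))

-- the scan computes the minimum-index candidate (js at length Ls), from any consistent state
theorem scan_min (s : List Char) (idx : PySem.Dict String Int) (i : Nat) (js : Int) (Ls : Nat) :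
    ∀ ls : List Nat,
      (∀ L ∈ ls, ∀ k, i + L ≤ s.length →
        idx.get? (String.ofList ((s.drop i).take L)) = some k → js ≤ k ∧ (k = js → L = Ls)) →
      Ls ∈ ls → i + Ls ≤ s.length →
      idx.get? (String.ofList ((s.drop i).take Ls)) = some js →
      ∀ (best : Option Int) (bl0 : Nat),
        (best = none ∨ (∃ k, best = some k ∧ js < k) ∨ (best = some js ∧ bl0 = Ls)) →
        scan s idx i ls (best, bl0) = (some js, Ls) := by
  intro ls
  induction ls with
  | nil => intro _ h; simp at h
  | cons L rest ih =>
      intro hs hmem hiLs hgs best bl0 hinv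
      have hs' : ∀ L ∈ rest, ∀ k, i + L ≤ s.length →
          idx.get? (String.ofList ((s.drop i).take L)) = some k → js ≤ k ∧ (k = js → L = Ls) :=
        fun L' hL' => hs L' (by simp [hL'])
      have habs : scan s idx i rest (some js, Ls) = (some js, Ls) :=
        scan_absorb s idx i js Ls rest (fun L' hL' k hk hg => (hs' L' hL' k hk hg).1)
      by_cases hL : L = Ls
      · subst hL
        simp only [scan]
        rw [PySem.List.slice_natCast_add, if_pos hiLs, hgs]
        rcases hinv with rfl | ⟨k, rfl, hk⟩ | ⟨rfl, rfl⟩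
        · exact habs
        · dsimp only
          rw [if_pos hk]
          exact habs
        · dsimp only
          rw [if_neg (by omega)]
          exact habs
      · have hmem' : Ls ∈ rest := by
          rcases List.mem_cons.mp hmem with h | h
          · exact absurd h.symm hL
          · exact h
        simp only [scan]
        rw [PySem.List.slice_natCast_add]
        split
        · rename_i hiL
          cases hg : idx.get? (String.ofList ((s.drop i).take L)) with
          | none => exact ih hs' hmem' hiLs hgs best bl0 hinv
          | some k =>
              have hk2 := hs L (by simp) k hiL hg
              have hjk : js < k := by
                rcases lt_or_eq_of_le hk2.1 with h | h
                · exact h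
                · exact absurd (hk2.2 h.symm) hL
              rcases hinv with rfl | ⟨b, rfl, hb⟩ | ⟨rfl, rfl⟩
              · exact ih hs' hmem' hiLs hgs _ _ (Or.inr (Or.inl ⟨k, rfl, hjk⟩))
              · dsimp only
                split
                · exact ih hs' hmem' hiLs hgs _ _ (Or.inr (Or.inl ⟨k, rfl, hjk⟩))
                · exact ih hs' hmem' hiLs hgs _ _ (Or.inr (Or.inl ⟨b, rfl, hb⟩))
              · dsimp only
                rw [if_neg (by omega)]
                exact ih hs' hmem' hiLs hgs _ _ (Or.inr (Or.inr ⟨rfl, rfl⟩))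
        · exact ih hs' hmem' hiLs hgs best bl0 hinv

-- per position: when A finds a first match w, B's scan returns (its index, |w|)
theorem step_some (s : List Char) (dict : List String) (i : Nat) (w : String)
    (hi : i ≤ s.length) (hf : findA (s.drop i) dict = some w) :
    ∃ j : Int, scan s (buildIdx dict 0 PySem.Dict.empty) i (lensOf dict) (none, 0)
      = (some j, w.toList.length) := by
  obtain ⟨j, hj, hpre, hmin⟩ := findA_first (s.drop i) dict w hf
  obtain ⟨hjlt, hje⟩ := List.getElem?_eq_some_iff.mp hj
  have hio : List.idxOf? w dict = some j := by
    rw [List.idxOf?_eq_some_iff]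
    refine ⟨hjlt, hje, ?_⟩
    intro j' hj' hj'e
    exact hmin j' hj' dict[j'] (List.getElem?_eq_some_iff.mpr ⟨Nat.lt_trans hj' hjlt, rfl⟩) (hj'e ▸ hpre)
  have hlen : w.toList.length ≤ (s.drop i).length := hpre.length_le
  have hiLs : i + w.toList.length ≤ s.length := by
    rw [List.length_drop] at hlen; omega
  have htake : (s.drop i).take w.toList.length = w.toList :=
    (List.prefix_iff_eq_take.mp hpre).symm
  have hgs : (buildIdx dict 0 PySem.Dict.empty).get?
      (String.ofList ((s.drop i).take w.toList.length)) = some (j : Int) := by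
    rw [htake, String.ofList_toList, idx_get, hio]
    simp
  have hmemL : w.toList.length ∈ lensOf dict := by
    rw [lensOf, PySem.List.mem_sorted, PySem.Set.mem_ofList]
    exact List.mem_map.mpr ⟨w, List.mem_of_getElem? hj, rfl⟩
  have hsound : ∀ L ∈ lensOf dict, ∀ k, i + L ≤ s.length →
      (buildIdx dict 0 PySem.Dict.empty).get? (String.ofList ((s.drop i).take L)) = some k →
      (j : Int) ≤ k ∧ (k = (j : Int) → L = w.toList.length) := by
    intro L _ k hiL hg
    obtain ⟨u, kn, hk, hkne, hknmin, hupre, hulen⟩ := cand_sound s dict i L k hiL hg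
    have hjkn : j ≤ kn := by
      rcases Nat.lt_or_ge kn j with h | h
      · exact absurd hupre (hmin kn h u hkne)
      · exact h
    constructor
    · rw [hk]; exact_mod_cast hjkn
    · intro hkj
      have hknj : kn = j := by rw [hk] at hkj; exact_mod_cast hkj
      subst hknj
      have huw : u = w := by
        have := List.getElem?_eq_some_iff.mp hkne
        rw [← this.2, hje]
      rw [← hulen, huw]
  exact ⟨(j : Int), scan_min s _ i (j : Int) w.toList.length (lensOf dict)
    hsound hmemL hiLs hgs none 0 (Or.inl rfl)⟩

theorem step_none (s : List Char) (dict : List String) (i : Nat)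
    (hf : findA (s.drop i) dict = none) :
    scan s (buildIdx dict 0 PySem.Dict.empty) i (lensOf dict) (none, 0) = (none, 0) := by
  apply scan_none
  intro L _ hiL
  cases hg : (buildIdx dict 0 PySem.Dict.empty).get? (String.ofList ((s.drop i).take L)) with
  | none => rfl
  | some k =>
      obtain ⟨u, kn, hk, hkne, hknmin, hupre, hulen⟩ := cand_sound s dict i L k hiL hg
      exact absurd hupre (findA_none (s.drop i) dict hf u (List.mem_of_getElem? hkne))

-- the two loops agree position for position (same fuel)
theorem loop_eq (s : List Char) (dict : List String) :
    ∀ (fuel i : Nat), i ≤ s.length →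
      loopB s (buildIdx dict 0 PySem.Dict.empty) (lensOf dict) fuel i
        = loopA dict fuel (s.drop i) := by
  intro fuel
  induction fuel with
  | zero =>
      intro i hi
      simp only [loopB]
      split
      · rename_i h
        cases hds : s.drop i with
        | nil =>
            exfalso
            have := congrArg List.length hds
            rw [List.length_drop] at this
            simp at this
            omega
        | cons a b => simp [loopA]
      · rename_i h
        have : s.drop i = [] := List.eq_nil_of_length_eq_zero (by rw [List.length_drop]; omega)
        rw [this]; rfl
  | succ f ih =>
      intro i hi
      simp only [loopB]
      split
      · rename_i h
        have hds : s.drop i = s[i] :: s.drop (i + 1) := List.drop_eq_getElem_cons h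
        cases hfa : findA (s.drop i) dict with
        | none =>
            rw [step_none s dict i hfa]
            conv_rhs => rw [hds]
            simp only [loopA]
            rw [← hds, hfa]
        | some w =>
            obtain ⟨j, hscan⟩ := step_some s dict i w (by omega) hfa
            rw [hscan]
            conv_rhs => rw [hds]
            simp only [loopA]
            rw [← hds, hfa]
            obtain ⟨j', _, hpre, _⟩ := findA_first (s.drop i) dict w hfa
            have hwlen : i + w.toList.length ≤ s.length := by
              have := hpre.length_le
              rw [List.length_drop] at this
              omega
            rw [ih (i + w.toList.length) hwlen]
            congr 1
            rw [PySem.List.slice_from_natCast, List.drop_drop]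
      · rename_i h
        have : s.drop i = [] := List.eq_nil_of_length_eq_zero (by rw [List.length_drop]; omega)
        rw [this]; rfl

-- ===== VERDICT (by name: the statement is the Claim_ definition above) =====
theorem function_spec : Claim_equal_function := by
  intro str dict _
  unfold Spec_function function function_alt
  rw [loop_eq str.toList dict _ 0 (by omega), List.drop_zero]
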